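-- pv_equiv track=rewrite | github.com/b4uharsha/vio-graph-olap | graph-packages/packages/export-worker/src/export_worker/backoff.py | estimate_polls_for_duration
-- ===== SOURCE A (Python) =====
-- POLL_DELAYS: tuple[int, ...] = (2, 3, 5, 8, 13, 21, 34, 55, 89, 90)
--
-- def estimate_polls_for_duration(duration_seconds: int) -> int:
--     """Estimate number of polls needed for a given export duration.
--
--     Useful for capacity planning and cost estimation.
--
--     Args:
--         duration_seconds: Expected export duration in seconds.
--
--     Returns:
--         Estimated number of poll invocations.
--
--     Examples:
--         >>> estimate_polls_for_duration(10)   # 10-second export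
--         3
--         >>> estimate_polls_for_duration(120)  # 2-minute export
--         8
--         >>> estimate_polls_for_duration(3600) # 1-hour export
--         47
--     """
--     if duration_seconds <= 0:
--         return 0
--
--     cumulative = 0
--     polls = 0
--
--     # Go through the Fibonacci sequence
--     for delay in POLL_DELAYS:
--         cumulative += delay
--         polls += 1
--         if cumulative >= duration_seconds:
--             return polls
--
--     # If we've exhausted the sequence and still haven't reached duration,
--     # continue at the capped rate (90s)
--     remaining = duration_seconds - cumulative
--     polls += (remaining + POLL_DELAYS[-1] - 1) // POLL_DELAYS[-1]
--
--     return polls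
-- ===== SOURCE B (Python) =====
-- _PREFIX = [2, 5, 10, 18, 31, 52, 86, 141, 230, 320]  # prefix sums of POLL_DELAYS
--
--
-- def estimate_polls_for_duration(duration_seconds: int) -> int:
--     """Estimate number of polls via prefix-sum table + binary search."""
--     if duration_seconds <= 0:
--         return 0
--     if duration_seconds > 320:
--         return len(_PREFIX) + (duration_seconds - 320 + 89) // 90
--     lo, hi = 0, len(_PREFIX)
--     while lo < hi:
--         mid = (lo + hi) // 2
--         if _PREFIX[mid] < duration_seconds:
--             lo = mid + 1
--         else:
--             hi = mid
--     return lo + 1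
-- ===== Notes on version B (the rewrite author's own statement) =====
-- stated objective: alternative
-- what changed: Replaced the linear accumulating scan over POLL_DELAYS with a precomputed prefix-sum table queried by a hand-written bisect_left binary search, plus a direct ceil-division formula for durations beyond the table.
import Mathlib
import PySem

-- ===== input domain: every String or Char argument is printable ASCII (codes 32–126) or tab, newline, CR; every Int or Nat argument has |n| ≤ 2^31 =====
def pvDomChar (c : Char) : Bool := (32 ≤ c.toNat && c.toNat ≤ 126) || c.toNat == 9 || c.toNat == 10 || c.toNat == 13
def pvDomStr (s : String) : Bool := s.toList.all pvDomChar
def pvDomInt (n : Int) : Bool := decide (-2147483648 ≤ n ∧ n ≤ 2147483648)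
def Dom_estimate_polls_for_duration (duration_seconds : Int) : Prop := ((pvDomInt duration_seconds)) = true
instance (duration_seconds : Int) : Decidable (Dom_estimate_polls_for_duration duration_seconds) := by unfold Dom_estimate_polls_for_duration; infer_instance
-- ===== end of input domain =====

-- B replaces A's linear accumulating scan with a prefix-sum table + binary search (alternative decomposition, same result).

-- ===== PORT A =====
def pollDelays : List Int := [2, 3, 5, 8, 13, 21, 34, 55, 89, 90]

-- the for-loop with early return; on exhaustion the code after the loop runs (remaining / capped-rate formula)
def pvALoop (delays : List Int) (duration_seconds cumulative polls : Int) : Int :=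
  match delays with
  | [] => polls + PySem.Int.floordiv ((duration_seconds - cumulative) + 90 - 1) 90
  | delay :: rest =>
    let cumulative := cumulative + delay
    let polls := polls + 1
    if cumulative ≥ duration_seconds then polls
    else pvALoop rest duration_seconds cumulative polls

def estimate_polls_for_duration (duration_seconds : Int) : Int :=
  if duration_seconds ≤ 0 then 0
  else pvALoop pollDelays duration_seconds 0 0

-- ===== PORT B =====
def pvPrefix : List Int := [2, 5, 10, 18, 31, 52, 86, 141, 230, 320]

-- hand-written bisect_left from Source B
-- the while-loop, as structural recursion on the fuel 'hi - lo' (an upper bound on its iterations)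
def pvBisectLeft (xs : List Int) (x : Int) (lo hi : Nat) : Nat → Nat
  | 0 => lo
  | fuel + 1 =>
    if lo < hi then
      let mid := (lo + hi) / 2
      if xs.getD mid 0 < x then pvBisectLeft xs x (mid + 1) hi fuel
      else pvBisectLeft xs x lo mid fuel
    else lo

def estimate_polls_for_duration_alt (duration_seconds : Int) : Int :=
  if duration_seconds ≤ 0 then 0
  else if duration_seconds > 320 then (pvPrefix.length : Int) + PySem.Int.floordiv (duration_seconds - 320 + 89) 90
  else (pvBisectLeft pvPrefix duration_seconds 0 pvPrefix.length pvPrefix.length : Int) + 1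

-- ===== PRECONDITION & SPEC =====
def Spec_estimate_polls_for_duration (duration_seconds : Int) (out : Int) : Prop := out = estimate_polls_for_duration_alt duration_seconds
instance (duration_seconds : Int) (out : Int) : Decidable (Spec_estimate_polls_for_duration duration_seconds out) := by unfold Spec_estimate_polls_for_duration; infer_instance

-- ===== CLAIM (what is proved, stated in full; the proofs are below) =====
def Claim_equal_estimate_polls_for_duration : Prop := ∀ (duration_seconds : Int), Dom_estimate_polls_for_duration duration_seconds → Spec_estimate_polls_for_duration duration_seconds (estimate_polls_for_duration duration_seconds)

-- ===== LEMMAS AND PROOFS =====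
set_option maxHeartbeats 2000000 in

theorem pv_total_eq (d : Int) : estimate_polls_for_duration d = estimate_polls_for_duration_alt d := by
  unfold estimate_polls_for_duration estimate_polls_for_duration_alt
  by_cases h0 : d ≤ 0
  · simp [h0]
  by_cases h1 : d > 320
  · rw [if_neg h0, if_neg h0, if_pos h1]
    simp only [pollDelays, pvALoop, pvPrefix, List.length]
    rw [PySem.Int.floordiv_eq_ediv_of_pos (by norm_num), PySem.Int.floordiv_eq_ediv_of_pos (by norm_num)]
    split_ifs <;> omega
  · have hd : 1 ≤ d := by omega
    have hd' : d ≤ 320 := by omega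
    interval_cases d <;> decide

-- ===== VERDICT (by name: the statement is the Claim_ definition above) =====
theorem estimate_polls_for_duration_spec : Claim_equal_estimate_polls_for_duration := by
  intro d _
  unfold Spec_estimate_polls_for_duration
  exact pv_total_eq d
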